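-- pv_equiv track=rewrite | github.com/sositon/Intro2CS | Ex_6/wave_editor.py | sound_slow
-- ===== SOURCE A (Python) =====
-- def sound_slow(data_list):
--     """
--     :param data_list: list of lists holds the audio data
--     :return: a new audio list contain the average of every two adjacent cells
--     """
--     result_list = []
--     average_list = [[average(sample[i], sample[i + 1]) for i in
--                      range(len(sample) - 1)] for sample in zip(*data_list)]
--     average_list = list(zip(*average_list))[::-1]
--     data_list = data_list[::-1]
--     for j in range(2 * len(data_list) - 1):
--         if j % 2 == 0:
--             result_list.append(data_list.pop())
--         else:
--             result_list.append(list(average_list.pop()))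
--     return result_list
--
-- def average(a, b, c=None):
--     """
--     :return: the int average of 2 or 3 numbers
--     """
--     if c is None:
--         return int((a + b) / 2)
--     return int((a + b + c) / 3)
-- ===== SOURCE B (Python) =====
-- def sound_slow(data_list):
--     if not data_list:
--         return []
--     m = min(len(r) for r in data_list)
--     result = [data_list[0]]
--     for prev, cur in zip(data_list, data_list[1:]):
--         result.append([average(x, y) for x, y in zip(prev[:m], cur[:m])])
--         result.append(cur)
--     return result
--
-- def average(a, b, c=None):
--     if c is None:
--         return int((a + b) / 2)
--     return int((a + b + c) / 3)
-- ===== Notes on version B (the rewrite author's own statement) =====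
-- stated objective: simpler
-- what changed: B walks adjacent row pairs directly in one pass, interleaving each row with a freshly built average row truncated to the global minimum row length, instead of A's transpose / per-column averaging / transpose-back / double reverse / parity pop loop.
import Mathlib
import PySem

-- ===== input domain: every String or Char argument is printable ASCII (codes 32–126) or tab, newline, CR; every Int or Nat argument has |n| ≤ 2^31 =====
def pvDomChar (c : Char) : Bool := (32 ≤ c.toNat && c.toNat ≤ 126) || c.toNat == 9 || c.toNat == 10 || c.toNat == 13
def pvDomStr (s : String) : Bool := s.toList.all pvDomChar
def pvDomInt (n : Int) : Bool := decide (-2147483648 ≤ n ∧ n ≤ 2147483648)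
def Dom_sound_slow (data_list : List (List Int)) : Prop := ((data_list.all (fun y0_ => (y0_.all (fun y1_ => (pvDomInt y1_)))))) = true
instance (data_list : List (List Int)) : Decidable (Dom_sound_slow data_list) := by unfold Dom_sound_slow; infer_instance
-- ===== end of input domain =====

-- B replaces A's transpose / average / transpose-back / reverse / pop loop by one direct
-- pass over adjacent row pairs (same result; objective: simpler).


-- ===== PORT A =====
-- average(a, b): int((a+b)/2) — float division then int() truncation toward zero;
-- exact on Dom since |a+b| ≤ 2^32 < 2^53 keeps the float computation exact
def pyAvg (a b : Int) : Int := Int.tdiv (a + b) 2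

-- zip(*rows): list of columns, truncated to the shortest row (builtin zip ported as a function)
def pyZipStar (rows : List (List Int)) : List (List Int) :=
  match rows with
  | [] => []
  | r :: rs =>
    (List.range (rs.foldl (fun a s => min a s.length) r.length)).map
      (fun i => (r :: rs).map (fun s => s.getD i 0))

-- one iteration of A's pop loop (list.pop() takes the last element; Pre_ keeps pops nonempty)
def popStep (st : List (List Int) × List (List Int) × List (List Int)) (j : Nat) :
    List (List Int) × List (List Int) × List (List Int) :=
  if j % 2 = 0 then (st.1 ++ [st.2.1.getLastD []], st.2.1.dropLast, st.2.2)
  else (st.1 ++ [st.2.2.getLastD []], st.2.1, st.2.2.dropLast)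

def sound_slow (data_list : List (List Int)) : List (List Int) :=
  let average_list := (pyZipStar data_list).map (fun sample =>
    (List.range (sample.length - 1)).map (fun i =>
      pyAvg (sample.getD i 0) (sample.getD (i + 1) 0)))
  let average_list2 := (pyZipStar average_list).reverse
  ((List.range (2 * data_list.length - 1)).foldl popStep
    ([], data_list.reverse, average_list2)).1

-- ===== PORT B =====
-- [average(x, y) for x, y in zip(prev[:m], cur[:m])]
def altAvgRow (m : Nat) (p c : List Int) : List Int :=
  ((p.take m).zip (c.take m)).map (fun xy => pyAvg xy.1 xy.2)

def sound_slow_alt (data_list : List (List Int)) : List (List Int) :=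
  match data_list with
  | [] => []
  | r :: rest =>
    let m := rest.foldl (fun a s => min a s.length) r.length
    ((r :: rest).zip rest).foldl
      (fun res pc => res ++ [altAvgRow m pc.1 pc.2, pc.2]) [r]

-- ===== PRECONDITION & SPEC =====
-- Pre_ excludes inputs with at least two rows of which some row is empty: there A pops
-- from an empty average list and raises IndexError.
def Pre_sound_slow (data_list : List (List Int)) : Prop :=
  data_list.length ≤ 1 ∨ ∀ r ∈ data_list, r ≠ []
instance (data_list : List (List Int)) : Decidable (Pre_sound_slow data_list) := by
  unfold Pre_sound_slow; infer_instance
def pvWitness_sound_slow : List (List Int) := [[1, 2], [3, 4]]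

def Spec_sound_slow (data_list : List (List Int)) (out : List (List Int)) : Prop := out = sound_slow_alt data_list
instance (data_list : List (List Int)) (out : List (List Int)) : Decidable (Spec_sound_slow data_list out) := by unfold Spec_sound_slow; infer_instance

-- ===== CLAIM (what is proved, stated in full; the proofs are below) =====
def Claim_equal_sound_slow : Prop := ∀ (data_list : List (List Int)), Dom_sound_slow data_list → Pre_sound_slow data_list → Spec_sound_slow data_list (sound_slow data_list)

-- ===== LEMMAS AND PROOFS =====

-- interleave rows with average rows (the common shape of both results)
def inter : List (List Int) → List (List Int) → List (List Int)
  | [], _ => []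
  | ds, [] => ds
  | d :: ds, a :: as => d :: a :: inter ds as

-- B's list of average rows, pair by pair
def avgs (m : Nat) : List Int → List (List Int) → List (List Int)
  | _, [] => []
  | p, c :: cs => altAvgRow m p c :: avgs m c cs

theorem avgs_length (m : Nat) : ∀ (D : List (List Int)) (d : List Int),
    (avgs m d D).length = D.length
  | [], _ => rfl
  | _ :: cs, _ => by simp [avgs, avgs_length m cs]

theorem foldl_min_le_init (rs : List (List Int)) (a : Nat) :
    rs.foldl (fun a s => min a s.length) a ≤ a := by
  induction rs generalizing a with
  | nil => simp
  | cons r rs ih => exact le_trans (ih _) (Nat.min_le_left _ _)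

theorem foldl_min_le_mem : ∀ (rs : List (List Int)) (a : Nat) (s : List Int), s ∈ rs →
    rs.foldl (fun a s => min a s.length) a ≤ s.length
  | [], _, s, hs => by simp at hs
  | r :: rs, _, s, hs => by
    rcases List.mem_cons.mp hs with h | h
    · subst h
      exact le_trans (foldl_min_le_init rs _) (Nat.min_le_right _ _)
    · exact foldl_min_le_mem rs _ s h

theorem foldl_min_pos : ∀ (rs : List (List Int)) (a : Nat), 1 ≤ a →
    (∀ s ∈ rs, 1 ≤ s.length) → 1 ≤ rs.foldl (fun a s => min a s.length) a
  | [], _, ha, _ => ha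
  | r :: rs, a, ha, h =>
    foldl_min_pos rs _ (le_min ha (h r List.mem_cons_self))
      (fun s hs => h s (List.mem_cons_of_mem _ hs))

theorem foldl_min_const (rs : List (List Int)) (k : Nat)
    (h : ∀ s ∈ rs, s.length = k) :
    rs.foldl (fun a s => min a s.length) k = k := by
  induction rs with
  | nil => rfl
  | cons r rs ih =>
    have hr := h r List.mem_cons_self
    simp [hr, ih (fun s hs => h s (List.mem_cons_of_mem _ hs))]

-- pop loop: result = acc ++ inter D A, for D one longer than A
theorem popLoop_eq (A : List (List Int)) :
    ∀ (D acc : List (List Int)), D.length = A.length + 1 → ∀ s, s % 2 = 0 →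
    ((List.range' s (2 * A.length + 1)).foldl popStep (acc, D.reverse, A.reverse)).1
      = acc ++ inter D A := by
  induction A with
  | nil =>
    intro D acc hD s hs
    match D, hD with
    | [d], _ => simp [popStep, inter, hs]
  | cons a as ih =>
    intro D acc hD s hs
    match D, hD with
    | d :: ds, hD =>
      have hds : ds.length = as.length + 1 := by simpa using hD
      have h1 : (s + 1) % 2 = 1 := by omega
      have h2 : (s + 2) % 2 = 0 := by omega
      have hlen : (2 * (a :: as).length + 1) = 2 * as.length + 1 + 1 + 1 := by
        simp; ring
      rw [hlen, List.range'_succ, List.range'_succ]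
      simp only [List.foldl_cons]
      have e1 : popStep (acc, (d :: ds).reverse, (a :: as).reverse) s
          = (acc ++ [d], ds.reverse, (a :: as).reverse) := by
        simp [popStep, hs, List.reverse_cons]
      have e2 : popStep (acc ++ [d], ds.reverse, (a :: as).reverse) (s + 1)
          = (acc ++ [d] ++ [a], ds.reverse, as.reverse) := by
        simp [popStep, h1, List.reverse_cons]
      rw [e1, e2, ih ds (acc ++ [d] ++ [a]) hds (s + 2) h2]
      simp [inter]

-- B's fold produces an interleaving
theorem alt_fold_eq (m : Nat) :
    ∀ (D : List (List Int)) (d : List Int) (acc : List (List Int)),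
    ((d :: D).zip D).foldl
      (fun res pc => res ++ [altAvgRow m pc.1 pc.2, pc.2]) (acc ++ [d])
      = acc ++ inter (d :: D) (avgs m d D) := by
  intro D
  induction D with
  | nil => intro d acc; simp [inter, avgs]
  | cons c cs ih =>
    intro d acc
    have hstep : acc ++ [d] ++ [altAvgRow m d c, c]
        = (acc ++ [d, altAvgRow m d c]) ++ [c] := by simp
    simp only [List.zip_cons_cons, List.foldl_cons, hstep, ih c]
    simp [inter, avgs]

-- getD through a map, in range (defaults are irrelevant)
theorem getD_map_in {α β : Type} (l : List α) (g : α → β) (j : Nat) (d : α) (e : β)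
    (hj : j < l.length) : (l.map g).getD j e = g (l.getD j d) := by
  rw [List.getD_eq_getElem _ _ (by simpa using hj), List.getD_eq_getElem _ _ hj,
    List.getElem_map]

theorem getD_map_range {β : Type} (k : Nat) (g : Nat → β) (j : Nat) (e : β) (hj : j < k) :
    ((List.range k).map g).getD j e = g j := by
  rw [List.getD_eq_getElem _ _ (by simpa using hj), List.getElem_map, List.getElem_range]

-- B's average row = the index form, when m is below both lengths
theorem altAvgRow_eq (m : Nat) (p c : List Int) (hp : m ≤ p.length) (hc : m ≤ c.length) :
    altAvgRow m p c
      = (List.range m).map (fun i => pyAvg (p.getD i 0) (c.getD i 0)) := by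
  apply List.ext_getElem
  · simp [altAvgRow]; omega
  · intro i h1 h2
    have hi : i < m := by simpa using h2
    have hip : i < p.length := by omega
    have hic : i < c.length := by omega
    simp [altAvgRow, List.getElem_zip, List.getElem_take, hip, hic]

-- avgs in index form
theorem avgs_eq (m : Nat) :
    ∀ (D : List (List Int)) (d : List Int),
    (∀ r ∈ d :: D, m ≤ r.length) →
    avgs m d D = (List.range D.length).map (fun j =>
      (List.range m).map (fun i =>
        pyAvg (((d :: D).getD j []).getD i 0) (((d :: D).getD (j + 1) []).getD i 0))) := by
  intro D
  induction D with
  | nil => intro d _; simp [avgs]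
  | cons c cs ih =>
    intro d h
    have hd : m ≤ d.length := h d (by simp)
    have hc : m ≤ c.length := h c (by simp)
    rw [List.length_cons, List.range_succ_eq_map]
    simp only [avgs, List.map_cons, List.map_map]
    congr 1
    · rw [altAvgRow_eq m d c hd hc]; simp
    · rw [ih c (fun r hr => h r (by simp at hr ⊢; tauto))]
      simp [Function.comp]

theorem pyZipStar_len (rows : List (List Int)) :
    ∀ s ∈ pyZipStar rows, s.length = rows.length := by
  intro s hs
  match rows with
  | [] => simp [pyZipStar] at hs
  | r :: rs =>
    simp only [pyZipStar, List.mem_map, List.mem_range] at hs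
    obtain ⟨i, _, rfl⟩ := hs
    simp

theorem pyZipStar_zero (rows : List (List Int))
    (h : ∀ s ∈ rows, s.length = 0) : pyZipStar rows = [] := by
  match rows with
  | [] => rfl
  | r :: rs =>
    have hr : r.length = 0 := h r List.mem_cons_self
    have hf : rs.foldl (fun a s => min a s.length) r.length = 0 := by
      rw [hr]
      exact foldl_min_const rs 0 (fun s hs => h s (List.mem_cons_of_mem _ hs))
    simp [pyZipStar, hf]

theorem pyZipStar_const_len (rows : List (List Int)) (k : Nat) (hne : rows ≠ [])
    (h : ∀ s ∈ rows, s.length = k) :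
    pyZipStar rows
      = (List.range k).map (fun j => rows.map (fun s => s.getD j 0)) := by
  match rows with
  | [] => exact absurd rfl hne
  | r :: rs =>
    have hr : r.length = k := h r List.mem_cons_self
    have hf : rs.foldl (fun a s => min a s.length) r.length = k := by
      rw [hr]
      exact foldl_min_const rs k (fun s hs => h s (List.mem_cons_of_mem _ hs))
    simp [pyZipStar, hf]

-- the average list A builds equals B's avgs, under Pre_
theorem AL_eq_avgs (d : List Int) (D : List (List Int))
    (hpre : Pre_sound_slow (d :: D)) :
    pyZipStar ((pyZipStar (d :: D)).map (fun sample =>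
      (List.range (sample.length - 1)).map (fun i =>
        pyAvg (sample.getD i 0) (sample.getD (i + 1) 0))))
      = avgs (D.foldl (fun a s => min a s.length) d.length) d D := by
  have hmem0 : ∀ s ∈ (pyZipStar (d :: D)).map (fun sample =>
      (List.range (sample.length - 1)).map (fun i =>
        pyAvg (sample.getD i 0) (sample.getD (i + 1) 0))), s.length = D.length := by
    intro s hs
    simp only [List.mem_map] at hs
    obtain ⟨t, ht, rfl⟩ := hs
    have := pyZipStar_len (d :: D) t ht
    simp [this]
  cases D with
  | nil =>
    rw [avgs]
    exact pyZipStar_zero _ (fun s hs => hmem0 s hs)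
  | cons c cs =>
    have hall : ∀ r ∈ d :: c :: cs, r ≠ [] := by
      rcases hpre with h | h
      · exfalso; simp at h
      · exact h
    have hlenpos : ∀ r ∈ d :: c :: cs, 1 ≤ r.length := by
      intro r hr
      have := hall r hr
      cases r with
      | nil => exact absurd rfl this
      | cons x xs => simp
    have hm1 : 1 ≤ (c :: cs).foldl (fun a s => min a s.length) d.length :=
      foldl_min_pos _ _ (hlenpos d (by simp))
        (fun s hs => hlenpos s (List.mem_cons_of_mem _ hs))
    have hmle : ∀ r ∈ d :: c :: cs,
        (c :: cs).foldl (fun a s => min a s.length) d.length ≤ r.length := by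
      intro r hr
      rcases List.mem_cons.mp hr with h | h
      · subst h; exact foldl_min_le_init _ _
      · exact foldl_min_le_mem _ _ _ h
    have hne : (pyZipStar (d :: c :: cs)).map (fun sample =>
        (List.range (sample.length - 1)).map (fun i =>
          pyAvg (sample.getD i 0) (sample.getD (i + 1) 0))) ≠ [] := by
      intro hcon
      have : ((pyZipStar (d :: c :: cs)).map (fun sample =>
        (List.range (sample.length - 1)).map (fun i =>
          pyAvg (sample.getD i 0) (sample.getD (i + 1) 0)))).length = 0 := by
        rw [hcon]; rfl
      simp only [List.length_map, pyZipStar, List.length_range] at this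
      omega
    rw [pyZipStar_const_len _ (c :: cs).length hne hmem0,
      avgs_eq _ _ _ hmle]
    apply List.map_congr_left
    intro j hj
    have hjlt : j < (c :: cs).length := List.mem_range.mp hj
    simp only [pyZipStar, List.map_map]
    apply List.map_congr_left
    intro i hi
    have hcol : ∀ jj, jj < (d :: c :: cs).length →
        (((d :: c :: cs).map (fun s => s.getD i 0)).getD jj 0)
          = ((d :: c :: cs).getD jj []).getD i 0 := by
      intro jj hjj
      exact getD_map_in _ _ jj [] 0 hjj
    simp only [Function.comp]
    have hlenmap : (List.map (fun s => s.getD i 0) (d :: c :: cs)).length - 1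
        = cs.length + 1 := by simp
    rw [hlenmap, getD_map_range _ _ j 0 (by simp at hjlt ⊢; omega)]
    rw [hcol j (by simp at hjlt ⊢; omega), hcol (j + 1) (by simp at hjlt ⊢; omega)]

theorem sound_slow_eq (data_list : List (List Int)) (hpre : Pre_sound_slow data_list) :
    sound_slow data_list = sound_slow_alt data_list := by
  match data_list with
  | [] => rfl
  | d :: D =>
    have hB : sound_slow_alt (d :: D)
        = inter (d :: D) (avgs (D.foldl (fun a s => min a s.length) d.length) d D) := by
      simpa [sound_slow_alt] using
        alt_fold_eq (D.foldl (fun a s => min a s.length) d.length) D d []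
    have hA : sound_slow (d :: D)
        = inter (d :: D) (avgs (D.foldl (fun a s => min a s.length) d.length) d D) := by
      show ((List.range (2 * (d :: D).length - 1)).foldl popStep
        ([], (d :: D).reverse,
          (pyZipStar ((pyZipStar (d :: D)).map (fun sample =>
            (List.range (sample.length - 1)).map (fun i =>
              pyAvg (sample.getD i 0) (sample.getD (i + 1) 0))))).reverse)).1
        = inter (d :: D) (avgs (D.foldl (fun a s => min a s.length) d.length) d D)
      rw [AL_eq_avgs d D hpre]
      have hlen : (d :: D).length
          = (avgs (D.foldl (fun a s => min a s.length) d.length) d D).length + 1 := by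
        rw [avgs_length]; simp
      have hrange : 2 * (d :: D).length - 1
          = 2 * (avgs (D.foldl (fun a s => min a s.length) d.length) d D).length + 1 := by
        rw [avgs_length]; simp; omega
      rw [hrange, List.range_eq_range']
      exact popLoop_eq _ (d :: D) [] hlen 0 rfl
    rw [hA, hB]

-- ===== VERDICT (by name: the statement is the Claim_ definition above) =====
theorem sound_slow_spec : Claim_equal_sound_slow := by
  intro d _ hpre
  unfold Spec_sound_slow
  exact sound_slow_eq d hpre
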